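-- pv_equiv track=rewrite | github.com/daronzwink/AdventOfCode2025 | day06/day06.py | find_column_boundaries
-- ===== SOURCE A (Python) =====
-- from typing import List, Tuple
--
-- def find_column_boundaries(lines: List[str]) -> List[Tuple[int, int]]:
--     """
--     Find column boundaries by identifying contiguous regions with content.
--
--     Args:
--         lines: List of strings representing all rows of the worksheet
--
--     Returns:
--         List of (start, end) tuples representing column boundaries
--     """
--     # Find maximum line length
--     max_len = max(len(line) for line in lines)
--
--     # Create boolean array marking positions where ANY row has content
--     has_content = [False] * max_len
--
--     for line in lines:
--         for i, char in enumerate(line):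
--             if char != ' ':
--                 has_content[i] = True
--
--     # Find contiguous regions of True values
--     columns = []
--     in_column = False
--     start = 0
--
--     for i, has_char in enumerate(has_content):
--         if has_char and not in_column:
--             in_column = True
--             start = i
--         elif not has_char and in_column:
--             in_column = False
--             columns.append((start, i))
--
--     # Handle last column if it extends to end
--     if in_column:
--         columns.append((start, len(has_content)))
--
--     return columns
-- ===== SOURCE B (Python) =====
-- from typing import List, Tuple
--
-- def find_column_boundaries(lines: List[str]) -> List[Tuple[int, int]]:
--     # Mark each column as content-bearing, then read off region edges by
--     # comparing each position with its neighbour (rising/falling edges).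
--     max_len = max(len(line) for line in lines)
--     content = [any(i < len(line) and line[i] != ' ' for line in lines)
--                for i in range(max_len)]
--     padded = [False] + content + [False]
--     edges = list(zip(padded, padded[1:]))
--     starts = [i for i, (prev, cur) in enumerate(edges) if cur and not prev]
--     ends = [i for i, (prev, cur) in enumerate(edges) if prev and not cur]
--     return list(zip(starts, ends))
-- ===== Notes on version B (the rewrite author's own statement) =====
-- stated objective: alternative
-- what changed: A marks content row-major into a mutable boolean array and runs an in_column/start state machine over it; B computes each column's content flag column-major with a short-circuiting any(), pads the flags with False on both sides, detects region boundaries as rising/falling edges between adjacent flags, and zips the rising-edge indices with the falling-edge indices.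
import Mathlib
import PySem

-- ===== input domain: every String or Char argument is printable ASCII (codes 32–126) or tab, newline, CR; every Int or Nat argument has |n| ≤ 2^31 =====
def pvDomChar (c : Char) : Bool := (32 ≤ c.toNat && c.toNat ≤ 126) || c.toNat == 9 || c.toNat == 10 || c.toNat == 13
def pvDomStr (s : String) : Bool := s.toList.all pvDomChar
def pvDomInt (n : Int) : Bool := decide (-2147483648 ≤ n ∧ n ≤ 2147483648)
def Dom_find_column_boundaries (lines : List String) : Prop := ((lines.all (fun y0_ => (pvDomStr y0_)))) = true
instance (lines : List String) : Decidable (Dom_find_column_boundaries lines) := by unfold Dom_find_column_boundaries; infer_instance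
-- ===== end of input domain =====

-- B replaces A's mutable marking array + in_column/start state machine by a
-- column-major content mask whose region boundaries are read off as the
-- rising/falling edges between adjacent mask positions (zipped together).

-- ===== PORT A =====

-- max(len(line) for line in lines); Python's max raises ValueError on [], excluded by Pre_
def pyMaxLenA (lines : List String) : Int :=
  match lines.map (fun l => PySem.Str.len l) with
  | [] => 0
  | x :: xs => xs.foldl max x

-- inner loop: for i, char in enumerate(line): if char != ' ': has_content[i] = True
def markLineA (acc : List Bool) (line : String) : List Bool :=
  (PySem.List.enumerate line.toList 0).foldl
    (fun a p => if p.2 ≠ ' ' then a.set p.1.toNat true else a) acc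

-- body of the scan loop over enumerate(has_content) with state (columns, in_column, start)
def stepA (st : List (Int × Int) × Bool × Int) (p : Int × Bool) :
    List (Int × Int) × Bool × Int :=
  if p.2 && !st.2.1 then (st.1, true, p.1)
  else if !p.2 && st.2.1 then (st.1 ++ [(st.2.2, p.1)], false, st.2.2)
  else st

def find_column_boundaries (lines : List String) : List (Int × Int) :=
  let max_len := pyMaxLenA lines
  let has_content := lines.foldl markLineA (List.replicate max_len.toNat false)
  let st := (PySem.List.enumerate has_content 0).foldl stepA ([], false, 0)
  if st.2.1 then st.1 ++ [(st.2.2, (has_content.length : Int))] else st.1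

-- ===== PORT B =====

-- max(len(line) for line in lines); raises on [] exactly like A's, excluded by Pre_
def pyMaxLenB (lines : List String) : Int :=
  match lines.map (fun l => PySem.Str.len l) with
  | [] => 0
  | x :: xs => xs.foldl max x

-- i < len(line) and line[i] != ' ': the guard plus the (then in-range) index
-- combine to a safe lookup
def hitC (cs : List Char) (i : Nat) : Bool :=
  match cs[i]? with
  | some c => c ≠ ' '
  | none => false

def contentAtB (lines : List String) (i : Nat) : Bool :=
  lines.any (fun line => hitC line.toList i)

def find_column_boundaries_alt (lines : List String) : List (Int × Int) :=
  let max_len := pyMaxLenB lines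
  -- [ ... for i in range(max_len)]; max_len ≥ 0 here (max of lengths)
  let content := (List.range max_len.toNat).map (contentAtB lines)
  let padded := false :: (content ++ [false])
  -- list(zip(padded, padded[1:])); padded[1:] = tail
  let edges := padded.zip (PySem.List.slice padded (some 1) none)
  let starts := (PySem.List.enumerate edges 0).filterMap
    (fun p => if p.2.2 && !p.2.1 then some p.1 else none)
  let ends := (PySem.List.enumerate edges 0).filterMap
    (fun p => if p.2.1 && !p.2.2 then some p.1 else none)
  starts.zip ends

-- ===== PRECONDITION & SPEC =====
-- Python's max() raises ValueError on an empty sequence, so both programs raise on [].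
def Pre_find_column_boundaries (lines : List String) : Prop := lines ≠ []
instance (lines : List String) : Decidable (Pre_find_column_boundaries lines) := by
  unfold Pre_find_column_boundaries; infer_instance

def pvWitness_find_column_boundaries : List String := ["ab  cd", " b   d!"]

def Spec_find_column_boundaries (lines : List String) (out : List (Int × Int)) : Prop :=
  out = find_column_boundaries_alt lines
instance (lines : List String) (out : List (Int × Int)) : Decidable (Spec_find_column_boundaries lines out) := by
  unfold Spec_find_column_boundaries; infer_instance

-- ===== CLAIM (what is proved, stated in full; the proofs are below) =====
def Claim_equal_find_column_boundaries : Prop :=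
  ∀ (lines : List String), Dom_find_column_boundaries lines →
    Pre_find_column_boundaries lines →
    Spec_find_column_boundaries lines (find_column_boundaries lines)

-- ===== LEMMAS AND PROOFS =====

-- reference run decomposition: runs inCol s bs k lists the (start, end) pairs of
-- the maximal true-runs of bs, positions counted from k, with a run open at s if inCol
def runs : Bool → Int → List Bool → Int → List (Int × Int)
  | inCol, s, [], k => if inCol then [(s, k)] else []
  | inCol, s, b :: bs, k =>
    if b then (if inCol then runs true s bs (k + 1) else runs true k bs (k + 1))
    else (if inCol then (s, k) :: runs false 0 bs (k + 1) else runs false 0 bs (k + 1))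


-- edge-selector recursions the filterMaps over the zipped pairs compute
def recS (prev : Bool) : List Bool → Int → List Int
  | [], _ => []
  | c :: l, k => (if c && !prev then [k] else []) ++ recS c l (k + 1)

def recE (prev : Bool) : List Bool → Int → List Int
  | [], _ => []
  | c :: l, k => (if prev && !c then [k] else []) ++ recE c l (k + 1)

lemma runs_false (s s' : Int) (bs : List Bool) (k : Int) :
    runs false s bs k = runs false s' bs k := by
  cases bs <;> simp [runs]

-- ---- A's marking loop characterised elementwise ----

lemma mark_foldl_length (l : List (Int × Char)) (acc : List Bool) :
    (l.foldl (fun a p => if p.2 ≠ ' ' then a.set p.1.toNat true else a) acc).length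
      = acc.length := by
  induction l generalizing acc with
  | nil => rfl
  | cons p l ih => simp only [List.foldl_cons]; rw [ih]; split <;> simp

lemma hit_shift (c : Char) (cs : List Char) (i k : Nat) (hik : i ≠ k) :
    (decide (k + 1 ≤ i) && hitC cs (i - (k + 1)))
      = (decide (k ≤ i) && hitC (c :: cs) (i - k)) := by
  by_cases h : k ≤ i
  · have h' : k + 1 ≤ i := by omega
    have : i - k = (i - (k + 1)) + 1 := by omega
    simp [h, h', this, hitC]
  · have h' : ¬ (k + 1 ≤ i) := by omega
    simp [h, h']

lemma mark_foldl_get (cs : List Char) (k : Nat) (acc : List Bool) (i : Nat)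
    (h : k + cs.length ≤ acc.length) :
    ((PySem.List.enumerate cs (k : Int)).foldl
        (fun a p => if p.2 ≠ ' ' then a.set p.1.toNat true else a) acc)[i]?
      = acc[i]?.map (fun b => b || (decide (k ≤ i) && hitC cs (i - k))) := by
  induction cs generalizing k acc with
  | nil =>
    simp [PySem.List.enumerate_nil, hitC]
  | cons c cs ih =>
    rw [PySem.List.enumerate_cons]
    simp only [List.foldl_cons]
    have hcast : (k : Int) + 1 = ((k + 1 : Nat) : Int) := by push_cast; ring
    by_cases hc : c = ' '
    · have : (if c ≠ ' ' then acc.set (k : Int).toNat true else acc) = acc := by simp [hc]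
      rw [this, hcast, ih (k + 1) acc (by simp only [List.length_cons] at h; omega)]
      by_cases hik : i = k
      · subst hik
        simp [hitC, hc]
      · rw [hit_shift c cs i k hik]
    · have hkacc : k < acc.length := by simp only [List.length_cons] at h; omega
      have : (if c ≠ ' ' then acc.set (k : Int).toNat true else acc)
          = acc.set k true := by simp [hc]
      rw [this, hcast, ih (k + 1) (acc.set k true)
        (by simp only [List.length_set, List.length_cons] at h ⊢; omega)]
      by_cases hik : i = k
      · subst hik
        have h1 : (acc.set i true)[i]? = some true := by
          simp [hkacc]
        obtain ⟨b, hb⟩ : ∃ b, acc[i]? = some b :=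
          ⟨_, List.getElem?_eq_getElem hkacc⟩
        simp [h1, hb, hitC, hc]
      · rw [List.getElem?_set_ne (by omega), hit_shift c cs i k hik]

lemma markLineA_length (acc : List Bool) (line : String) :
    (markLineA acc line).length = acc.length := by
  unfold markLineA; exact mark_foldl_length _ _

lemma foldl_markLineA_get (lines : List String) (acc : List Bool) (i : Nat)
    (h : ∀ l ∈ lines, l.toList.length ≤ acc.length) :
    (lines.foldl markLineA acc)[i]?
      = acc[i]?.map (fun b => b || lines.any (fun l => hitC l.toList i)) := by
  induction lines generalizing acc with
  | nil => simp
  | cons l ls ih =>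
    simp only [List.foldl_cons]
    rw [ih (markLineA acc l)
        (by intro x hx; rw [markLineA_length]; exact h x (List.mem_cons_of_mem _ hx))]
    have : (markLineA acc l)[i]? = acc[i]?.map (fun b => b || hitC l.toList i) := by
      unfold markLineA
      have := mark_foldl_get l.toList 0 acc i (by simpa using h l (List.mem_cons_self))
      simpa using this
    rw [this]
    cases acc[i]? <;> simp [Bool.or_assoc]

-- ---- max_len bounds every line's length ----

lemma init_le_foldl_max (xs : List Int) (x : Int) : x ≤ xs.foldl max x := by
  induction xs generalizing x with
  | nil => simp
  | cons a xs ih => exact le_trans (le_max_left x a) (ih (max x a))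

lemma mem_le_foldl_max : ∀ (xs : List Int) (x y : Int), y ∈ xs → y ≤ xs.foldl max x := by
  intro xs
  induction xs with
  | nil => intro x y hy; cases hy
  | cons a xs ih =>
    intro x y hy
    rcases List.mem_cons.mp hy with h | h
    · rw [h]; exact le_trans (le_max_right x a) (init_le_foldl_max xs (max x a))
    · exact ih (max x a) y h

lemma len_le_maxLenA (lines : List String) (l : String) (hl : l ∈ lines) :
    l.toList.length ≤ (pyMaxLenA lines).toNat := by
  have hlen : (PySem.Str.len l : Int) = (l.toList.length : Int) := by
    simp [PySem.Str.len_eq]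
  cases lines with
  | nil => cases hl
  | cons a ls =>
    have : PySem.Str.len l ≤ pyMaxLenA (a :: ls) := by
      unfold pyMaxLenA
      simp only [List.map_cons]
      rcases List.mem_cons.mp hl with h | h
      · subst h; exact init_le_foldl_max _ _
      · exact mem_le_foldl_max _ _ _ (List.mem_map_of_mem h)
    omega

-- ---- the two content masks agree ----

lemma contentA_eq (lines : List String) :
    lines.foldl markLineA (List.replicate (pyMaxLenA lines).toNat false)
      = (List.range (pyMaxLenA lines).toNat).map (contentAtB lines) := by
  apply List.ext_getElem?
  intro i
  rw [foldl_markLineA_get lines _ i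
      (by intro l hl; rw [List.length_replicate]; exact len_le_maxLenA lines l hl)]
  by_cases hi : i < (pyMaxLenA lines).toNat
  · simp [hi, contentAtB]
  · simp [hi]

-- ---- A's scan loop equals runs ----

def finishA (total : Int) (r : List (Int × Int) × Bool × Int) : List (Int × Int) :=
  if r.2.1 then r.1 ++ [(r.2.2, total)] else r.1

lemma scanA_runs (bs : List Bool) : ∀ (k : Int) (cols : List (Int × Int)) (inCol : Bool) (s : Int),
    finishA (k + bs.length) ((PySem.List.enumerate bs k).foldl stepA (cols, inCol, s))
      = cols ++ runs inCol s bs k := by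
  induction bs with
  | nil =>
    intro k cols inCol s
    cases inCol <;> simp [PySem.List.enumerate_nil, runs, finishA]
  | cons b bs ih =>
    intro k cols inCol s
    rw [PySem.List.enumerate_cons]
    simp only [List.foldl_cons]
    rw [show k + (((b :: bs).length : Nat) : Int) = (k + 1) + (bs.length : Int) by
      push_cast [List.length_cons]; ring]
    cases b <;> cases inCol
    · -- b = false, inCol = false
      rw [show stepA (cols, false, s) (k, false) = (cols, false, s) by simp [stepA]]
      rw [ih (k + 1) cols false s, runs_false s 0]
      simp [runs]
    · -- b = false, inCol = true: close the run
      rw [show stepA (cols, true, s) (k, false) = (cols ++ [(s, k)], false, s) by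
        simp [stepA]]
      rw [ih (k + 1) (cols ++ [(s, k)]) false s, runs_false s 0]
      simp [runs, List.append_assoc]
    · -- b = true, inCol = false: open a run
      rw [show stepA (cols, false, s) (k, true) = (cols, true, k) by simp [stepA]]
      rw [ih (k + 1) cols true k]
      simp [runs]
    · -- b = true, inCol = true
      rw [show stepA (cols, true, s) (k, true) = (cols, true, s) by simp [stepA]]
      rw [ih (k + 1) cols true s]
      simp [runs]

-- ---- B's filterMaps compute the edge recursions ----

lemma filterS (l : List Bool) : ∀ (p : Bool) (k : Int),
    (PySem.List.enumerate ((p :: l).zip l) k).filterMap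
        (fun q => if q.2.2 && !q.2.1 then some q.1 else none) = recS p l k := by
  induction l with
  | nil => intro p k; simp [PySem.List.enumerate_nil, recS]
  | cons c l ih =>
    intro p k
    simp only [List.zip_cons_cons, PySem.List.enumerate_cons, List.filterMap_cons]
    rw [ih c (k + 1)]
    by_cases h : c && !p <;> simp [recS, h]

lemma filterE (l : List Bool) : ∀ (p : Bool) (k : Int),
    (PySem.List.enumerate ((p :: l).zip l) k).filterMap
        (fun q => if q.2.1 && !q.2.2 then some q.1 else none) = recE p l k := by
  induction l with
  | nil => intro p k; simp [PySem.List.enumerate_nil, recE]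
  | cons c l ih =>
    intro p k
    simp only [List.zip_cons_cons, PySem.List.enumerate_cons, List.filterMap_cons]
    rw [ih c (k + 1)]
    by_cases h : p && !c <;> simp [recE, h]

-- ---- zipping the edges recovers runs ----

lemma runs_zip (bs : List Bool) :
    (∀ k, (recS false (bs ++ [false]) k).zip (recE false (bs ++ [false]) k)
        = runs false 0 bs k)
    ∧ (∀ k s, (s :: recS true (bs ++ [false]) k).zip (recE true (bs ++ [false]) k)
        = runs true s bs k) := by
  induction bs with
  | nil =>
    constructor
    · intro k; simp [recS, recE, runs]
    · intro k s; simp [recS, recE, runs]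
  | cons b bs ih =>
    obtain ⟨ihP, ihQ⟩ := ih
    constructor
    · intro k
      cases b
      · simpa [recS, recE, runs] using ihP (k + 1)
      · simpa [recS, recE, runs] using ihQ (k + 1) k
    · intro k s
      cases b
      · simpa [recS, recE, runs] using ihP (k + 1)
      · simpa [recS, recE, runs] using ihQ (k + 1) s

-- ---- assembling the two ports ----

lemma altB_eq_runs (lines : List String) :
    find_column_boundaries_alt lines
      = runs false 0 ((List.range (pyMaxLenB lines).toNat).map (contentAtB lines)) 0 := by
  show (let max_len := pyMaxLenB lines
        let content := (List.range max_len.toNat).map (contentAtB lines)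
        let padded := false :: (content ++ [false])
        let edges := padded.zip (PySem.List.slice padded (some 1) none)
        let starts := (PySem.List.enumerate edges 0).filterMap
          (fun p => if p.2.2 && !p.2.1 then some p.1 else none)
        let ends := (PySem.List.enumerate edges 0).filterMap
          (fun p => if p.2.1 && !p.2.2 then some p.1 else none)
        starts.zip ends) = _
  simp only []
  set bs := (List.range (pyMaxLenB lines).toNat).map (contentAtB lines) with hbs
  rw [PySem.List.slice_from_one]
  rw [show (false :: (bs ++ [false])).tail = bs ++ [false] from rfl]
  rw [filterS (bs ++ [false]) false 0, filterE (bs ++ [false]) false 0, (runs_zip bs).1 0]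

lemma portA_eq_runs (lines : List String) :
    find_column_boundaries lines
      = runs false 0 ((List.range (pyMaxLenA lines).toNat).map (contentAtB lines)) 0 := by
  show (let max_len := pyMaxLenA lines
        let has_content := lines.foldl markLineA (List.replicate max_len.toNat false)
        let st := (PySem.List.enumerate has_content 0).foldl stepA ([], false, 0)
        if st.2.1 then st.1 ++ [(st.2.2, (has_content.length : Int))] else st.1) = _
  simp only []
  rw [contentA_eq lines]
  have h := scanA_runs ((List.range (pyMaxLenA lines).toNat).map (contentAtB lines))
    0 [] false 0
  simp only [finishA, zero_add, List.length_map, List.length_range] at h ⊢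
  exact h

-- ===== VERDICT (by name: the statement is the Claim_ definition above) =====
theorem find_column_boundaries_spec : Claim_equal_find_column_boundaries := by
  intro lines _ _
  unfold Spec_find_column_boundaries
  rw [portA_eq_runs, altB_eq_runs]
  rfl
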